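-- pv_equiv track=rewrite | github.com/brufinus/fe16-tools | app/tools/utility.py | get_yield_ratios
-- ===== SOURCE A (Python) =====
-- def get_yield_ratios(score):
--     """Return the yield, ratio, and stat-booster coefficient over a score range.
--
--     This function is used for the seed simulator tool.
--
--     :param score: The hidden greenhouse score.
--     :type score: int
--     :return: The associated yield, ratio, and stat-booster coefficient.
--     :rtype: tuple[int, str, int]
--     """
--
--     ranges = [
--         (1, 0, "", 0),
--         (21, 1, "7:3", 1),
--         (41, 1, "2:8", 3),
--         (61, 2, "7:3", 5),
--         (81, 2, "4:6", 10),
--         (91, 3, "8:2", 15),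
--         (101, 4, "3:7", 20),
--     ]
--
--     for limit, yld, ratio, coefficient in ranges:
--         if score < limit:
--             return yld, ratio, coefficient
-- ===== SOURCE B (Python) =====
-- LIMITS = [1, 21, 41, 61, 81, 91, 101]
-- PAYLOADS = [
--     (0, "", 0),
--     (1, "7:3", 1),
--     (1, "2:8", 3),
--     (2, "7:3", 5),
--     (2, "4:6", 10),
--     (3, "8:2", 15),
--     (4, "3:7", 20),
-- ]
--
--
-- def get_yield_ratios(score):
--     """Return the yield, ratio, and stat-booster coefficient over a score range.
--
--     Binary search (bisect_right) over the sorted limits, then one table lookup.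
--     """
--     lo, hi = 0, len(LIMITS)
--     while lo < hi:
--         mid = (lo + hi) // 2
--         if score < LIMITS[mid]:
--             hi = mid
--         else:
--             lo = mid + 1
--     return PAYLOADS[lo]
-- ===== Notes on version B (the rewrite author's own statement) =====
-- stated objective: alternative
-- what changed: Replaces the linear scan over (limit, payload) rows with a hand-written binary search (bisect_right) over a sorted limits list followed by a single table lookup into a parallel payload list.
-- outside the precondition, e.g. on get_yield_ratios(101): A returns None, B raises IndexError
import Mathlib
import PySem

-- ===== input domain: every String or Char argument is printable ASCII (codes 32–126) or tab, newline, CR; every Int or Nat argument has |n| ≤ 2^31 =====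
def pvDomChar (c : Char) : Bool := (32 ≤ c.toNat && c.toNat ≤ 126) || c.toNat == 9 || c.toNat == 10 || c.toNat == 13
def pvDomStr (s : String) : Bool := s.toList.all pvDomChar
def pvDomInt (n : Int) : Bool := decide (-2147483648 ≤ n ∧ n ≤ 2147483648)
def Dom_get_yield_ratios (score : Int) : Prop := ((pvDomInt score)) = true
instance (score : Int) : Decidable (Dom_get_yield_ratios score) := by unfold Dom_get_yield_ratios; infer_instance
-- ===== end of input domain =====

-- B replaces A's linear scan over rows with a binary search over the limits plus one
-- table lookup (alternative decomposition; no speed claim on a 7-row table).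

-- ===== PORT A =====
-- A's for-loop over the ranges list: first row with score < limit wins; falling off
-- the loop is Python's implicit None (outside Pre_, modelled as Option.none here).
def pvLoopA : List (Int × Int × String × Int) → Int → Option (Int × String × Int)
  | [], _ => none
  | (limit, y, r, c) :: rest, s => if s < limit then some (y, r, c) else pvLoopA rest s

def pvRangesA : List (Int × Int × String × Int) :=
  [(1, 0, "", 0), (21, 1, "7:3", 1), (41, 1, "2:8", 3), (61, 2, "7:3", 5),
   (81, 2, "4:6", 10), (91, 3, "8:2", 15), (101, 4, "3:7", 20)]

def get_yield_ratios (score : Int) : Int × String × Int :=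
  -- getD default is unreachable under Pre_ (score < 101); Python returns None there
  (pvLoopA pvRangesA score).getD (0, "", 0)

-- ===== PORT B =====
def pvLimitsB : List Int := [1, 21, 41, 61, 81, 91, 101]

def pvPayloadsB : List (Int × String × Int) :=
  [(0, "", 0), (1, "7:3", 1), (1, "2:8", 3), (2, "7:3", 5),
   (2, "4:6", 10), (3, "8:2", 15), (4, "3:7", 20)]

-- the while-loop of Source B: bisect_right binary search on indices lo ≤ hi
def pvBisect (limits : List Int) (x : Int) (lo hi : Nat) : Nat :=
  if h : lo < hi then
    let mid := (lo + hi) / 2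
    if x < limits.getD mid 0 then pvBisect limits x lo mid
    else pvBisect limits x (mid + 1) hi
  else lo
termination_by hi - lo
decreasing_by all_goals omega

def get_yield_ratios_alt (score : Int) : Int × String × Int :=
  -- PAYLOADS[lo]: pyGet?, none (IndexError) unreachable under Pre_ (score < 101)
  (PySem.List.pyGet? pvPayloadsB (pvBisect pvLimitsB score 0 pvLimitsB.length)).getD (0, "", 0)

-- ===== PRECONDITION & SPEC =====
-- Pre_ excludes score ≥ 101: there A falls off its loop and returns None, which is not
-- a value of the declared tuple type (and B's indexing raises IndexError there).
def Pre_get_yield_ratios (score : Int) : Prop := score < 101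
instance (score : Int) : Decidable (Pre_get_yield_ratios score) := by unfold Pre_get_yield_ratios; infer_instance

def pvWitness_get_yield_ratios : Int := 50

def Spec_get_yield_ratios (score : Int) (out : Int × String × Int) : Prop := out = get_yield_ratios_alt score
instance (score : Int) (out : Int × String × Int) : Decidable (Spec_get_yield_ratios score out) := by unfold Spec_get_yield_ratios; infer_instance

-- ===== CLAIM (what is proved, stated in full; the proofs are below) =====
def Claim_equal_get_yield_ratios : Prop := ∀ (score : Int), Dom_get_yield_ratios score → Pre_get_yield_ratios score → Spec_get_yield_ratios score (get_yield_ratios score)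

-- ===== LEMMAS AND PROOFS =====

-- ===== VERDICT (by name: the statement is the Claim_ definition above) =====
set_option maxRecDepth 8192 in
theorem get_yield_ratios_spec : Claim_equal_get_yield_ratios := by
  intro score _ hpre
  unfold Pre_get_yield_ratios at hpre
  unfold Spec_get_yield_ratios get_yield_ratios get_yield_ratios_alt
  rcases lt_or_ge score 1 with h1 | h1
  · simp [pvLoopA, pvRangesA, pvBisect, pvLimitsB, pvPayloadsB, PySem.List.pyGet?, PySem.List.pyIdx?,
      show score < 1 by omega, show score < 21 by omega, show score < 61 by omega]
  rcases lt_or_ge score 21 with h2 | h2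
  · simp [pvLoopA, pvRangesA, pvBisect, pvLimitsB, pvPayloadsB, PySem.List.pyGet?, PySem.List.pyIdx?,
      show ¬ score < 1 by omega, show score < 21 by omega, show score < 61 by omega]
  rcases lt_or_ge score 41 with h3 | h3
  · simp [pvLoopA, pvRangesA, pvBisect, pvLimitsB, pvPayloadsB, PySem.List.pyGet?, PySem.List.pyIdx?,
      show ¬ score < 1 by omega, show ¬ score < 21 by omega, show score < 41 by omega, show score < 61 by omega]
  rcases lt_or_ge score 61 with h4 | h4
  · simp [pvLoopA, pvRangesA, pvBisect, pvLimitsB, pvPayloadsB, PySem.List.pyGet?, PySem.List.pyIdx?,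
      show ¬ score < 1 by omega, show ¬ score < 21 by omega, show ¬ score < 41 by omega, show score < 61 by omega]
  rcases lt_or_ge score 81 with h5 | h5
  · simp [pvLoopA, pvRangesA, pvBisect, pvLimitsB, pvPayloadsB, PySem.List.pyGet?, PySem.List.pyIdx?,
      show ¬ score < 1 by omega, show ¬ score < 21 by omega, show ¬ score < 41 by omega, show ¬ score < 61 by omega, show score < 81 by omega, show score < 91 by omega]
  rcases lt_or_ge score 91 with h6 | h6
  · simp [pvLoopA, pvRangesA, pvBisect, pvLimitsB, pvPayloadsB, PySem.List.pyGet?, PySem.List.pyIdx?,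
      show ¬ score < 1 by omega, show ¬ score < 21 by omega, show ¬ score < 41 by omega, show ¬ score < 61 by omega, show ¬ score < 81 by omega, show score < 91 by omega]
  · simp [pvLoopA, pvRangesA, pvBisect, pvLimitsB, pvPayloadsB, PySem.List.pyGet?, PySem.List.pyIdx?,
      show ¬ score < 1 by omega, show ¬ score < 21 by omega, show ¬ score < 41 by omega, show ¬ score < 61 by omega, show ¬ score < 81 by omega, show ¬ score < 91 by omega, show score < 101 from hpre]
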